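-- pv_equiv track=rewrite | github.com/rahulgorle/GFG-POTD | Find the N-th character.py | nthCharacter
-- ===== SOURCE A (Python) =====
-- def nthCharacter(s, r, n):
--     if n==0:
--         return s[0]
--     for i in range(r):
--         temp=""
--         for j in range(n//2 +1):
--             if s[j]=="0":
--                 temp+="01"
--             else:
--                 temp+="10"
--         s=temp[:]
--     return s[n]
-- ===== SOURCE B (Python) =====
-- def nthCharacter(s, r, n):
--     if n == 0:
--         return s[0]
--     if r <= 0:
--         return s[n]
--     k = min(r, 32)                 # n fits in 32 bits, so longer shifts behave the same
--     low = n & ((1 << k) - 1)       # the low k bits of n decide how often the bit is flipped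
--     flip = False
--     while low:
--         flip ^= (low & 1) == 1
--         low >>= 1
--     bit = (s[n >> k] != "0") ^ flip
--     return "1" if bit else "0"
-- ===== Notes on version B (the rewrite author's own statement) =====
-- stated objective: faster
-- what changed: Instead of rebuilding the whole string r times (0->01, 1->10), B reads the answer directly: it is the source character at index n >> r (treated as '1' unless it equals '0'), flipped once per set bit among the low min(r,32) bits of n.
import Mathlib
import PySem

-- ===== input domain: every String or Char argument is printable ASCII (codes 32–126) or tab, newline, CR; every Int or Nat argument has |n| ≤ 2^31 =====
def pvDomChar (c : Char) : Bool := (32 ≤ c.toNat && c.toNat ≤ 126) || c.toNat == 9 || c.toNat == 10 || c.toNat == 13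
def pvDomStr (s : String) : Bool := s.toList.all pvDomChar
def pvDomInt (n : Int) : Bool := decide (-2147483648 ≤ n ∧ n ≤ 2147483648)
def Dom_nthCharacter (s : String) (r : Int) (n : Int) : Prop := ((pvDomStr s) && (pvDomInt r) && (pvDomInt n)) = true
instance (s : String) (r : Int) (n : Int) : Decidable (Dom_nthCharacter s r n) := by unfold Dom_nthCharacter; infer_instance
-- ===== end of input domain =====

-- B replaces A's r rounds of string rebuilding (O(r*n)) by direct bit arithmetic on n (objective: faster).

-- ===== PORT A =====
-- one iteration of A's outer loop: temp = "" ; for j in range(n//2+1): temp += "01" if s[j]=="0" else "10"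
def nthCharacterRound (s : List Char) (n : Int) : List Char :=
  (PySem.List.pyRange 0 (PySem.Int.floordiv n 2 + 1) 1).foldl
    (fun temp j =>
      temp ++ (if PySem.List.pyGetD s j ' ' = '0' then ['0', '1'] else ['1', '0'])) []
      -- s[j] raises IndexError when out of range: excluded by Pre_; default ' ' unused inside Pre_

def nthCharacter (s : String) (r : Int) (n : Int) : String :=
  if n = 0 then
    -- s[0]; none (IndexError) is excluded by Pre_
    ((PySem.List.pyGet? s.toList 0).map (fun c => String.ofList [c])).getD ""
  else
    -- s[n] on the string after r rounds; none (IndexError) is excluded by Pre_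
    ((PySem.List.pyGet?
        ((PySem.List.pyRange 0 r 1).foldl (fun t _ => nthCharacterRound t n) s.toList) n).map
      (fun c => String.ofList [c])).getD ""

-- ===== PORT B =====
-- Source B's parity loop: while low: flip ^= (low & 1) == 1; low >>= 1   (low = n & mask is ≥ 0, so Nat)
def nthCharacterParity (low : Nat) (flip : Bool) : Bool :=
  if low = 0 then flip
  else nthCharacterParity (low / 2) (xor flip (low % 2 = 1))
termination_by low
decreasing_by omega

def nthCharacter_alt (s : String) (r : Int) (n : Int) : String :=
  if n = 0 then
    -- s[0]; none (IndexError) is excluded by Pre_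
    ((PySem.List.pyGet? s.toList 0).map (fun c => String.ofList [c])).getD ""
  else if r ≤ 0 then
    -- s[n]; none (IndexError) is excluded by Pre_
    ((PySem.List.pyGet? s.toList n).map (fun c => String.ofList [c])).getD ""
  else
    let k : Nat := (min r 32).toNat
    let low : Nat := (PySem.Int.band n (((1 : Int) <<< k) - 1)).toNat
    let flip := nthCharacterParity low false
    -- s[n >> k] raises IndexError when out of range: excluded by Pre_
    let bit := xor (PySem.List.pyGetD s.toList (n >>> k) ' ' != '0') flip
    if bit then "1" else "0"

-- ===== PRECONDITION & SPEC =====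
-- Pre_ = exactly where Python A returns: s nonempty when n = 0; for r ≥ 1 it needs
-- 0 ≤ n (a negative n makes temp empty, then s[n] raises) and n//2 < len(s) for the
-- reads s[j]; for r ≤ 0 it returns s[n], needing -len(s) ≤ n < len(s).
def Pre_nthCharacter (s : String) (r : Int) (n : Int) : Prop :=
  if n = 0 then s.toList ≠ []
  else if 1 ≤ r then 0 ≤ n ∧ PySem.Int.floordiv n 2 < (s.toList.length : Int)
  else PySem.Raise.InRange s.toList.length n
instance (s : String) (r : Int) (n : Int) : Decidable (Pre_nthCharacter s r n) := by
  unfold Pre_nthCharacter; infer_instance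

def pvWitness_nthCharacter : String × Int × Int := ("01", 2, 3)

def Spec_nthCharacter (s : String) (r : Int) (n : Int) (out : String) : Prop := out = nthCharacter_alt s r n
instance (s : String) (r : Int) (n : Int) (out : String) : Decidable (Spec_nthCharacter s r n out) := by unfold Spec_nthCharacter; infer_instance

-- ===== CLAIM (what is proved, stated in full; the proofs are below) =====
def Claim_equal_nthCharacter : Prop := ∀ (s : String) (r : Int) (n : Int), Dom_nthCharacter s r n → Pre_nthCharacter s r n → Spec_nthCharacter s r n (nthCharacter s r n)

-- ===== LEMMAS AND PROOFS =====

-- '1' for a set bit, '0' for a clear one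
def pvBitChar (b : Bool) : Char := if b then '1' else '0'

-- one round of A, in closed map form: char k of the new string comes from char k/2, flipped if k is odd
def pvStep (m : Nat) (s : List Char) : List Char :=
  (List.range (2 * m)).map (fun k => pvBitChar (xor (s.getD (k / 2) ' ' != '0') (k % 2 = 1)))

lemma pvBitChar_ne (b : Bool) : (pvBitChar b != '0') = b := by cases b <;> rfl

lemma pvStep_length (m : Nat) (s : List Char) : (pvStep m s).length = 2 * m := by
  simp [pvStep]

lemma pvStep_getD (m : Nat) (s : List Char) (k : Nat) (hk : k < 2 * m) :
    (pvStep m s).getD k ' ' = pvBitChar (xor (s.getD (k / 2) ' ' != '0') (k % 2 = 1)) := by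
  simpa [pvStep] using PySem.List.getD_map_range
    (fun k => pvBitChar (xor (s.getD (k / 2) ' ' != '0') (k % 2 = 1))) (2 * m) k ' ' hk

-- the flatMap form of one round IS pvStep
lemma pvStepAux (s : List Char) (m : Nat) :
    (List.range m).flatMap (fun j => if s.getD j ' ' = '0' then ['0','1'] else ['1','0']) = pvStep m s := by
  induction m with
  | zero => rfl
  | succ m ih =>
    have hstep : pvStep (m + 1) s = pvStep m s ++
        [pvBitChar (xor (s.getD m ' ' != '0') false), pvBitChar (xor (s.getD m ' ' != '0') true)] := by
      have h2 : 2 * (m + 1) = (2*m + 1) + 1 := by omega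
      have e1 : (2*m)/2 = m := by omega
      have e2 : (2*m+1)/2 = m := by omega
      have e3 : (2*m)%2 = 0 := by omega
      have e4 : (2*m+1)%2 = 1 := by omega
      rw [pvStep, pvStep, h2, List.range_succ, List.range_succ, List.map_append, List.map_append]
      simp [e1, e2, e3, e4]
    rw [List.range_succ, List.flatMap_append, ih, hstep]
    simp only [List.flatMap_cons, List.flatMap_nil, List.append_nil]
    congr 1
    by_cases h : s[m]?.getD ' ' = '0' <;> simp [h, pvBitChar]

-- A's round IS pvStep at m = n//2 + 1 (for 0 ≤ n)
lemma nthCharacterRound_eq (s : List Char) (n : Int) (hn : 0 ≤ n) :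
    nthCharacterRound s n = pvStep (n.toNat / 2 + 1) s := by
  rw [nthCharacterRound, PySem.List.foldl_append_eq_flatMap]
  have hm : PySem.Int.floordiv n 2 + 1 = ((n.toNat / 2 + 1 : Nat) : Int) := by
    rw [PySem.Int.floordiv_eq_ediv_of_pos (by omega)]
    omega
  rw [hm, PySem.List.pyRange_zero_nat, List.flatMap_map, List.nil_append]
  rw [← pvStepAux s (n.toNat / 2 + 1)]
  apply List.flatMap_congr
  intro j hj
  simp


-- parity loop: accumulator splits off
lemma nthCharacterParity_acc (x : Nat) (f : Bool) :
    nthCharacterParity x f = xor f (nthCharacterParity x false) := by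
  induction x using Nat.strong_induction_on generalizing f with
  | _ x ih =>
  by_cases h : x = 0
  · subst h; simp [nthCharacterParity]
  · have hlt : x / 2 < x := Nat.div_lt_self (by omega) one_lt_two
    conv_lhs => rw [nthCharacterParity, if_neg h]
    conv_rhs => rw [nthCharacterParity, if_neg h]
    rw [ih _ hlt (xor f (decide (x % 2 = 1))), ih _ hlt (xor false (decide (x % 2 = 1)))]
    cases f <;> cases hd : (decide (x % 2 = 1)) <;>
      cases hp : nthCharacterParity (x / 2) false <;> simp

-- parity loop recursion on the low bit
lemma nthCharacterParity_rec (x : Nat) :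
    nthCharacterParity x false = xor (x % 2 = 1) (nthCharacterParity (x / 2) false) := by
  by_cases h : x = 0
  · subst h; simp [nthCharacterParity]
  · conv_lhs => rw [nthCharacterParity, if_neg h]
    rw [nthCharacterParity_acc]
    simp

-- heart of the equivalence: R+1 rounds of pvStep read off the source char at k >>> (R+1),
-- flipped by the parity of the low R+1 bits of k
lemma pvStep_iterate_getD (m : Nat) (R : Nat) (s : List Char) (k : Nat) (hk : k < 2 * m) :
    ((pvStep m)^[R + 1] s).getD k ' ' =
      pvBitChar (xor (s.getD (k >>> (R + 1)) ' ' != '0')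
                     (nthCharacterParity (k % 2 ^ (R + 1)) false)) := by
  induction R generalizing s k with
  | zero =>
    rw [Function.iterate_one, pvStep_getD m s k hk]
    have h1 : k >>> 1 = k / 2 := by simp [Nat.shiftRight_eq_div_pow]
    have h0 : nthCharacterParity 0 false = false := by simp [nthCharacterParity]
    have hone : nthCharacterParity 1 false = true := by
      rw [nthCharacterParity_rec]; simp [nthCharacterParity]
    rw [h1, pow_one]
    rcases Nat.mod_two_eq_zero_or_one k with h | h
    · rw [h, h0]; simp
    · rw [h, hone]; simp
  | succ R ih =>
    rw [Function.iterate_succ_apply', pvStep_getD m _ k hk,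
        ih s (k / 2) (by omega), pvBitChar_ne]
    have hsh : (k / 2) >>> (R + 1) = k >>> (R + 2) := by
      rw [Nat.shiftRight_eq_div_pow, Nat.shiftRight_eq_div_pow, Nat.div_div_eq_div_mul]
      congr 1
      rw [pow_succ]
      ring
    have hp2 : (2:Nat) ^ (R + 2) = 2 * 2 ^ (R + 1) := by rw [pow_succ]; ring
    have hpar : nthCharacterParity (k % 2 ^ (R + 2)) false =
        xor (decide (k % 2 = 1)) (nthCharacterParity (k / 2 % 2 ^ (R + 1)) false) := by
      rw [nthCharacterParity_rec (k % 2 ^ (R + 2))]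
      have hm2 : k % 2 ^ (R + 2) % 2 = k % 2 := Nat.mod_mod_of_dvd k (dvd_pow_self 2 (by omega))
      have hd2 : k % 2 ^ (R + 2) / 2 = k / 2 % 2 ^ (R + 1) := by
        rw [hp2]; exact Nat.mod_mul_right_div_self k 2 (2 ^ (R + 1))
      rw [hm2, hd2]
    rw [hsh, hpar]
    congr 1
    rw [Bool.xor_assoc]
    congr 1
    rw [Bool.xor_comm]

lemma pvStep_iterate_length (m : Nat) (R : Nat) (s : List Char) :
    ((pvStep m)^[R + 1] s).length = 2 * m := by
  rw [Function.iterate_succ_apply']; exact pvStep_length _ _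

-- a fold that ignores the list elements is an iterate
lemma pvFoldl_const {α β : Type} (f : α → α) (l : List β) (init : α) :
    l.foldl (fun t _ => f t) init = f^[l.length] init := by
  induction l generalizing init with
  | nil => rfl
  | cons x xs ih => simp [List.foldl_cons, ih, Function.iterate_succ_apply]

-- ===== VERDICT (by name: the statement is the Claim_ definition above) =====
theorem nthCharacter_spec : Claim_equal_nthCharacter := by
  intro s r n hdom hpre
  unfold Spec_nthCharacter nthCharacter nthCharacter_alt
  by_cases hn : n = 0
  · rw [if_pos hn, if_pos hn]
  · rw [if_neg hn, if_neg hn]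
    by_cases hr : r ≤ 0
    · rw [if_pos hr, PySem.List.pyRange_one_eq_nil hr, List.foldl_nil]
    · rw [if_neg hr]
      rw [Pre_nthCharacter, if_neg hn, if_pos (by omega : (1:Int) ≤ r)] at hpre
      obtain ⟨hn0, -⟩ := hpre
      have hn31 : n ≤ 2147483648 := by
        simp only [Dom_nthCharacter, pvDomInt, Bool.and_eq_true, decide_eq_true_eq] at hdom
        exact hdom.2.2
      set N := n.toNat with hN
      have hnN : n = (N : Int) := by omega
      set m := N / 2 + 1 with hm
      have hkm : N < 2 * m := by omega
      -- A's side
      have hfun : (fun (t : List Char) (_ : Int) => nthCharacterRound t n)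
          = fun t _ => pvStep m t := by
        funext t j; rw [nthCharacterRound_eq t n hn0]
      have hR : (PySem.List.pyRange 0 r 1).length = (r.toNat - 1) + 1 := by
        rw [PySem.List.length_pyRange_one]; omega
      rw [hfun, pvFoldl_const, hR]
      have hlenIt := pvStep_iterate_length m (r.toNat - 1) s.toList
      have hNlt : N < ((pvStep m)^[(r.toNat - 1) + 1] s.toList).length := by omega
      rw [PySem.List.pyGet?_of_nonneg _ hn0, ← hN,
          List.getElem?_eq_getElem hNlt, ← List.getD_eq_getElem _ ' ' hNlt,
          pvStep_iterate_getD m (r.toNat - 1) s.toList N hkm]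
      -- B's side
      dsimp only
      have hone : ((1:Int) <<< (min r 32).toNat) - 1 = (((2 ^ (min r 32).toNat - 1 : Nat)) : Int) := by
        rw [Int.shiftLeft_eq, one_mul, Nat.cast_sub Nat.one_le_two_pow]
        push_cast; ring
      rw [hone, hnN, PySem.Int.band_natCast, Int.toNat_natCast,
          Nat.and_two_pow_sub_one_eq_mod]
      have hshift : ((N : Int)) >>> (min r 32).toNat = ((N >>> (min r 32).toNat : Nat) : Int) := by
        rw [Int.shiftRight_eq_div_pow, Nat.shiftRight_eq_div_pow]
        exact_mod_cast (Int.natCast_div N (2 ^ (min r 32).toNat)).symm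
      rw [hshift, PySem.List.pyGetD_natCast]
      -- reconcile min r 32 with r
      have hrt : (r.toNat - 1) + 1 = r.toNat := by omega
      rw [hrt]
      by_cases h32 : r ≤ 32
      · rw [min_eq_left h32]
        cases hX : xor (s.toList.getD (N >>> r.toNat) ' ' != '0')
            (nthCharacterParity (N % 2 ^ r.toNat) false) <;> simp [pvBitChar]
      · have hmin : (min r 32).toNat = 32 := by
          rw [min_eq_right (by omega : (32:Int) ≤ r)]; rfl
        rw [hmin]
        have hpow : (2:Nat) ^ 32 = 4294967296 := by norm_num
        have hN32 : N < 2 ^ 32 := by omega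
        have hNr : N < 2 ^ r.toNat := by
          calc N < 2 ^ 32 := hN32
            _ ≤ 2 ^ r.toNat := Nat.pow_le_pow_right (by norm_num) (by omega)
        have e1 : N >>> 32 = N >>> r.toNat := by
          rw [Nat.shiftRight_eq_div_pow, Nat.shiftRight_eq_div_pow,
              Nat.div_eq_of_lt hN32, Nat.div_eq_of_lt hNr]
        have e2 : N % 2 ^ 32 = N % 2 ^ r.toNat := by
          rw [Nat.mod_eq_of_lt hN32, Nat.mod_eq_of_lt hNr]
        rw [e1, e2]
        cases hX : xor (s.toList.getD (N >>> r.toNat) ' ' != '0')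
            (nthCharacterParity (N % 2 ^ r.toNat) false) <;> simp [pvBitChar]
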